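-- pv_equiv track=rewrite | github.com/Thang04-ML/CHATBOTLUATGIAOTHONG | Chatbot4vnmtraffic/Source/smooth_context.py | extract_consecutive_subarray
-- ===== SOURCE A (Python) =====
-- def extract_consecutive_subarray(numbers):
--     subarrays = []
--     current_subarray = []
--     for num in numbers:
--         if not current_subarray or num == current_subarray[-1] + 1:
--             current_subarray.append(num)
--         else:
--             subarrays.append(current_subarray)
--             current_subarray = [num]
--     subarrays.append(current_subarray)  # Append the last subarray
--     return subarrays
-- ===== SOURCE B (Python) =====
-- def extract_consecutive_subarray(numbers):
--     # Find the run boundaries in one indexed pass and slice whole runs out,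
--     # instead of growing a current run element by element.
--     subarrays = []
--     start = 0
--     for i in range(1, len(numbers)):
--         if numbers[i] != numbers[i - 1] + 1:
--             subarrays.append(numbers[start:i])
--             start = i
--     subarrays.append(numbers[start:])
--     return subarrays
-- ===== Notes on version B (the rewrite author's own statement) =====
-- stated objective: alternative
-- what changed: Replaced A's element-by-element growing and flushing of a mutable current-run list with one indexed pass that detects run boundaries and slices whole runs out of the input.
import Mathlib
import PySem

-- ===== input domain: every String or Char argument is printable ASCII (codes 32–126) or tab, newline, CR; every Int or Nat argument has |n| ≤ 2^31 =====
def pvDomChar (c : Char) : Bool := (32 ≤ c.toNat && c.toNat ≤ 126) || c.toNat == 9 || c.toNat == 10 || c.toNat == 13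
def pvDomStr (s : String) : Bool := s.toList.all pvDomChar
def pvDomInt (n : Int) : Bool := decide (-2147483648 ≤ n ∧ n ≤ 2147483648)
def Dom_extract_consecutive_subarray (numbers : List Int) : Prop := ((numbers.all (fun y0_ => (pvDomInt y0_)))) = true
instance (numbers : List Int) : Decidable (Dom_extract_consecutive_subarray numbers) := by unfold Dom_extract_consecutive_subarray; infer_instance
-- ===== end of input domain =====

-- B finds the run boundaries in one indexed pass and slices whole runs out, instead of
-- A's element-by-element growing and flushing of a current-run list; objective: alternative.

-- ===== PORT A =====
-- one step of A's loop body: extend current_subarray or flush it and start a new one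
def pvStepA (p : List (List Int) × List Int) (num : Int) : List (List Int) × List Int :=
  if p.2 = [] ∨ some num = (PySem.List.pyGet? p.2 (-1)).map (· + 1) then
    (p.1, p.2 ++ [num])
  else
    (p.1 ++ [p.2], [num])

def extract_consecutive_subarray (numbers : List Int) : List (List Int) :=
  let st := numbers.foldl pvStepA ([], [])
  st.1 ++ [st.2]

-- ===== PORT B =====
-- one step of B's loop body over the index i: at a boundary, slice out the finished run
-- numbers[start:i] and move start to i, otherwise do nothing
def pvStepB (numbers : List Int) (p : List (List Int) × Int) (i : Int) : List (List Int) × Int :=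
  if PySem.List.pyGet? numbers i ≠ (PySem.List.pyGet? numbers (i - 1)).map (· + 1) then
    (p.1 ++ [PySem.List.slice numbers (some p.2) (some i)], i)
  else p

def extract_consecutive_subarray_alt (numbers : List Int) : List (List Int) :=
  let st := (PySem.List.pyRange 1 (numbers.length : Int) 1).foldl (pvStepB numbers) ([], 0)
  st.1 ++ [PySem.List.slice numbers (some st.2) none]

-- ===== PRECONDITION & SPEC =====
def Spec_extract_consecutive_subarray (numbers : List Int) (out : List (List Int)) : Prop := out = extract_consecutive_subarray_alt numbers
instance (numbers : List Int) (out : List (List Int)) : Decidable (Spec_extract_consecutive_subarray numbers out) := by unfold Spec_extract_consecutive_subarray; infer_instance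

-- ===== CLAIM (what is proved, stated in full; the proofs are below) =====
def Claim_equal_extract_consecutive_subarray : Prop := ∀ (numbers : List Int), Dom_extract_consecutive_subarray numbers → Spec_extract_consecutive_subarray numbers (extract_consecutive_subarray numbers)

-- ===== LEMMAS AND PROOFS =====

-- the last element of the run numbers[s:k] is numbers[k-1]
theorem pvLast_drop_take (xs : List Int) (s k : Nat) (h1 : s < k) (h2 : k ≤ xs.length) :
    ((xs.drop s).take (k - s)).getLast? = xs[k - 1]? := by
  have hlen : ((xs.drop s).take (k - s)).length = k - s := by
    simp [List.length_take, List.length_drop]; omega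
  rw [List.getLast?_eq_getElem?, hlen]
  rw [List.getElem?_take_of_lt (by omega), List.getElem?_drop]
  congr 1; omega

-- loop invariant: after the first k elements (k ≥ 1), A's and B's accumulated run lists
-- agree and A's current run is the slice numbers[s:k] for B's current start s
theorem pvInv (xs : List Int) :
    ∀ k, 1 ≤ k → k ≤ xs.length →
    ∃ (S : List (List Int)) (s : Nat), s < k ∧
      (PySem.List.pyRange 1 (k : Int) 1).foldl (pvStepB xs) ([], 0) = (S, (s : Int)) ∧
      (xs.take k).foldl pvStepA ([], []) = (S, (xs.drop s).take (k - s)) := by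
  intro k hk hkn
  induction k, hk using Nat.le_induction with
  | base =>
    refine ⟨[], 0, by omega, ?_, ?_⟩
    · simp [PySem.List.pyRange_one_eq_nil (by omega : (1:Int) ≤ 1)]
    · obtain ⟨x, rest, rfl⟩ : ∃ x rest, xs = x :: rest := by
        cases xs with
        | nil => simp at hkn
        | cons a l => exact ⟨a, l, rfl⟩
      simp [pvStepA]
  | succ k hk1 ih =>
    obtain ⟨S, s, hs, hB, hA⟩ := ih (by omega)
    have hklen : k < xs.length := by omega
    have hck : (xs.drop s).take (k - s) ≠ [] := by
      have : ((xs.drop s).take (k - s)).length = k - s := by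
        simp [List.length_take, List.length_drop]; omega
      intro h; rw [h] at this; simp at this; omega
    have hlast : ((xs.drop s).take (k - s)).getLast? = some xs[k-1] := by
      rw [pvLast_drop_take xs s k hs (by omega), List.getElem?_eq_getElem (by omega)]
    -- split the range at k
    have hrange : PySem.List.pyRange 1 ((k+1 : Nat) : Int) 1
        = PySem.List.pyRange 1 (k : Int) 1 ++ [(k : Int)] := by
      push_cast
      exact PySem.List.pyRange_one_succ_right (by exact_mod_cast hk1)
    have htake : xs.take (k+1) = xs.take k ++ [xs[k]] := by
      rw [List.take_add_one, List.getElem?_eq_getElem hklen]; rfl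
    -- both conditions reduce to: xs[k] = xs[k-1] + 1
    have hgetk : PySem.List.pyGet? xs ((k : Int)) = some xs[k] := by
      rw [PySem.List.pyGet?_natCast, List.getElem?_eq_getElem hklen]
    have hgetk1 : PySem.List.pyGet? xs ((k : Int) - 1) = some xs[k-1] := by
      have : (k : Int) - 1 = ((k - 1 : Nat) : Int) := by omega
      rw [this, PySem.List.pyGet?_natCast, List.getElem?_eq_getElem (by omega)]
    rw [hrange, List.foldl_append, hB, htake, List.foldl_append, hA]
    by_cases hcond : xs[k] = xs[k-1] + 1
    · -- run continues: B skips the index, A appends to the current run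
      refine ⟨S, s, by omega, ?_, ?_⟩
      · simp only [List.foldl_cons, List.foldl_nil, pvStepB, hgetk, hgetk1]
        simp [hcond]
      · simp only [List.foldl_cons, List.foldl_nil, pvStepA,
          PySem.List.pyGet?_neg_one, hlast, hck]
        have hgrow : (xs.drop s).take (k - s) ++ [xs[k]] = (xs.drop s).take (k + 1 - s) := by
          have hidx : (xs.drop s)[k - s]? = some xs[k] := by
            rw [List.getElem?_drop, show s + (k - s) = k from by omega,
              List.getElem?_eq_getElem hklen]
          rw [show k + 1 - s = (k - s) + 1 by omega, List.take_add_one, hidx]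
          rfl
        rw [if_pos (Or.inr (by simp [hcond]))]
        rw [hgrow]
    · -- boundary: B slices out numbers[s:k] (= A's flushed current run), start moves to k
      refine ⟨S ++ [(xs.drop s).take (k - s)], k, by omega, ?_, ?_⟩
      · simp only [List.foldl_cons, List.foldl_nil, pvStepB, hgetk, hgetk1]
        rw [if_pos (by simp [hcond])]
        rw [PySem.List.slice_natCast]
      · simp only [List.foldl_cons, List.foldl_nil, pvStepA,
          PySem.List.pyGet?_neg_one, hlast, hck]
        rw [if_neg (by simp [hcond])]
        have : (xs.drop k).take (k + 1 - k) = [xs[k]] := by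
          rw [show k + 1 - k = 1 by omega]
          rw [List.take_one, List.head?_drop, List.getElem?_eq_getElem hklen]
          rfl
        rw [this]

-- ===== VERDICT (by name: the statement is the Claim_ definition above) =====
theorem extract_consecutive_subarray_spec : Claim_equal_extract_consecutive_subarray := by
  intro numbers _
  unfold Spec_extract_consecutive_subarray extract_consecutive_subarray extract_consecutive_subarray_alt
  cases numbers with
  | nil => rfl
  | cons x rest =>
    obtain ⟨S, s, hs, hB, hA⟩ :=
      pvInv (x :: rest) (x :: rest).length (by simp) le_rfl
    rw [List.take_length] at hA
    simp only [hB, hA]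
    rw [PySem.List.slice_from_natCast]
    congr 1
    rw [List.take_of_length_le (by simp [List.length_drop])]
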